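-- pv_equiv track=rewrite | github.com/AdamStypczyc/SPD_Stypczyc_Jankowski | 4. algorytmy/NEH.py | find_index_2d
-- ===== SOURCE A (Python) =====
-- def find_index_2d(array, current_task_index, value):
--     indexes = []
--
--     max_array = 0
--     for i in range(current_task_index):
--         for j in range(len(array[i])):
--             if array[i][j] == value:
--                 if array[i][j] > max_array:
--                     max_array = array[i][j]
--
--     for i in range(current_task_index):
--         for j in range(len(array[i])):
--             if array[i][j] == max_array:
--                 indexes = []
--                 indexes.append((i, j))
--
--     if not indexes:
--         return None
--     else:
--         # return [indexes[len(indexes)-1]]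
--         return indexes
-- ===== SOURCE B (Python) =====
-- def find_index_2d(array, current_task_index, value):
--     for i in reversed(range(current_task_index)):
--         row = array[i]
--         for j in reversed(range(len(row))):
--             if row[j] == value:
--                 return [(i, j)]
--     return None
-- ===== Notes on version B (the rewrite author's own statement) =====
-- stated objective: simpler
-- what changed: Replaces A's two full nested sweeps (a max-fold deriving a search target and a reset-and-append scan keeping only the last hit) with a single reverse-order early-exit search for the requested value.
-- intended difference: When value is absent from the scanned rows (or is negative), A's max_array sentinel stays 0 and A returns the position of the last 0 cell instead (e.g. A([[0]],1,5)=[(0,0)], A([[3,-2],[0,5]],2,-2)=[(1,0)]); B returns the last occurrence of value itself (None if absent), which is the intended lookup. — e.g. on find_index_2d([[0]], 1, 5): A returns some [(0, 0)], B returns none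
import Mathlib
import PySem

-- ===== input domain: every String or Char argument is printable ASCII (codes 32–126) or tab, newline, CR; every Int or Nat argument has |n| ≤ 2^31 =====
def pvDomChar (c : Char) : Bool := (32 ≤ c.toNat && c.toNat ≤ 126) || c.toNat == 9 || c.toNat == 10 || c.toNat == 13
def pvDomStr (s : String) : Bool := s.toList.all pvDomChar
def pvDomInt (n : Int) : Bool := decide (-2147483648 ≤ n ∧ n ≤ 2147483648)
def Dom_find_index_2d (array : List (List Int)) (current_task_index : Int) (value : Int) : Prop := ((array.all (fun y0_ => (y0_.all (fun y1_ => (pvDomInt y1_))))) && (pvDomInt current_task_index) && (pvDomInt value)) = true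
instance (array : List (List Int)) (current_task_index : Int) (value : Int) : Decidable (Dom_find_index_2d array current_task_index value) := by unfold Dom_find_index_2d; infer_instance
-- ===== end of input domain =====

-- B is a single reverse-order early-exit search for value (objective: simpler); where A's
-- 0-sentinel makes it return the last 0 cell instead (value absent or negative), B returns the
-- last occurrence of value itself — stated as the intended difference D_ below.

-- ===== PORT A =====
-- first nested loop of A: the running max over cells equal to value
def pvMaxA (array : List (List Int)) (current_task_index : Int) (value : Int) : Int :=
  (PySem.List.pyRange 0 current_task_index 1).foldl (fun m i =>
    (PySem.List.pyRange 0 (((PySem.List.pyGetD array i []).length : Int)) 1).foldl (fun m j =>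
      if PySem.List.pyGetD (PySem.List.pyGetD array i []) j 0 == value then
        (if PySem.List.pyGetD (PySem.List.pyGetD array i []) j 0 > m then
          PySem.List.pyGetD (PySem.List.pyGetD array i []) j 0 else m)
      else m) m) 0

-- second nested loop of A: 'indexes' after the reset-and-append sweep
def pvIndexesA (array : List (List Int)) (current_task_index : Int) (value : Int) : List (Int × Int) :=
  (PySem.List.pyRange 0 current_task_index 1).foldl (fun idxs i =>
    (PySem.List.pyRange 0 (((PySem.List.pyGetD array i []).length : Int)) 1).foldl (fun idxs j =>
      if PySem.List.pyGetD (PySem.List.pyGetD array i []) j 0 == pvMaxA array current_task_index value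
      then [(i, j)] else idxs) idxs) []

def find_index_2d (array : List (List Int)) (current_task_index : Int) (value : Int) : Option (List (Int × Int)) :=
  if (pvIndexesA array current_task_index value).isEmpty then none
  else some (pvIndexesA array current_task_index value)

-- ===== PORT B =====
def find_index_2d_alt (array : List (List Int)) (current_task_index : Int) (value : Int) : Option (List (Int × Int)) :=
  ((PySem.List.pyRange 0 current_task_index 1).reverse).findSome? (fun i =>
    ((PySem.List.pyRange 0 (((PySem.List.pyGetD array i []).length : Int)) 1).reverse).findSome? (fun j =>
      if PySem.List.pyGetD (PySem.List.pyGetD array i []) j 0 == value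
      then some [(i, j)] else none))

-- ===== PRECONDITION & SPEC =====
-- Pre_ excludes exactly the inputs where Python A raises IndexError:
-- current_task_index exceeding the number of rows (range then reaches a missing row).
def Pre_find_index_2d (array : List (List Int)) (current_task_index : Int) (value : Int) : Prop :=
  current_task_index ≤ (array.length : Int)
instance (array : List (List Int)) (current_task_index : Int) (value : Int) : Decidable (Pre_find_index_2d array current_task_index value) := by unfold Pre_find_index_2d; infer_instance
def pvWitness_find_index_2d : List (List Int) × Int × Int := ([[1, 2], [2, 1]], 2, 2)

-- all cell values A's loops scan (rows 0 .. current_task_index-1, flattened); input-only, used by D_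
def pvScanned (array : List (List Int)) (current_task_index : Int) : List Int :=
  (array.take current_task_index.toNat).flatten

-- When value is absent from the scanned rows (or is negative), A's max_array sentinel stays 0 and
-- A returns the position of the last scanned 0 cell; B returns the last occurrence of value itself
-- (None if absent), which is the intended lookup.
def D_find_index_2d (array : List (List Int)) (current_task_index : Int) (value : Int) : Prop :=
  (0 < value ∧ value ∉ pvScanned array current_task_index ∧ (0 : Int) ∈ pvScanned array current_task_index) ∨
  (value < 0 ∧ (value ∈ pvScanned array current_task_index ∨ (0 : Int) ∈ pvScanned array current_task_index))
instance (array : List (List Int)) (current_task_index : Int) (value : Int) : Decidable (D_find_index_2d array current_task_index value) := by unfold D_find_index_2d; infer_instance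

def Spec_find_index_2d (array : List (List Int)) (current_task_index : Int) (value : Int) (out : Option (List (Int × Int))) : Prop := ¬ D_find_index_2d array current_task_index value → out = find_index_2d_alt array current_task_index value
instance (array : List (List Int)) (current_task_index : Int) (value : Int) (out : Option (List (Int × Int))) : Decidable (Spec_find_index_2d array current_task_index value out) := by unfold Spec_find_index_2d; infer_instance

def pvDiffWitness_find_index_2d : List (List Int) × Int × Int := ([[0]], 1, 5)
def pvDiffWitnessOut_find_index_2d : (Option (List (Int × Int))) × (Option (List (Int × Int))) := (some [(0, 0)], none)

-- ===== CLAIM (what is proved, stated in full; the proofs are below) =====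
def Claim_unchanged_find_index_2d : Prop := ∀ (array : List (List Int)) (current_task_index : Int) (value : Int), Dom_find_index_2d array current_task_index value → Pre_find_index_2d array current_task_index value → Spec_find_index_2d array current_task_index value (find_index_2d array current_task_index value)
def Claim_changed_find_index_2d : Prop := Dom_find_index_2d (pvDiffWitness_find_index_2d.1) (pvDiffWitness_find_index_2d.2.1) (pvDiffWitness_find_index_2d.2.2) ∧ Pre_find_index_2d (pvDiffWitness_find_index_2d.1) (pvDiffWitness_find_index_2d.2.1) (pvDiffWitness_find_index_2d.2.2) ∧ D_find_index_2d (pvDiffWitness_find_index_2d.1) (pvDiffWitness_find_index_2d.2.1) (pvDiffWitness_find_index_2d.2.2) ∧ find_index_2d (pvDiffWitness_find_index_2d.1) (pvDiffWitness_find_index_2d.2.1) (pvDiffWitness_find_index_2d.2.2) = pvDiffWitnessOut_find_index_2d.1 ∧ find_index_2d_alt (pvDiffWitness_find_index_2d.1) (pvDiffWitness_find_index_2d.2.1) (pvDiffWitness_find_index_2d.2.2) = pvDiffWitnessOut_find_index_2d.2 ∧ pvDiffWitnessOut_find_index_2d.1 ≠ pvDiffWitnessOut_find_index_2d.2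
def Claim_exact_find_index_2d : Prop := ∀ (array : List (List Int)) (current_task_index : Int) (value : Int), Dom_find_index_2d array current_task_index value → Pre_find_index_2d array current_task_index value → D_find_index_2d array current_task_index value → find_index_2d array current_task_index value ≠ find_index_2d_alt array current_task_index value

-- ===== LEMMAS AND PROOFS =====

-- nested loop = loop over the flattened list
theorem pv_foldl_foldl_flatMap {α β γ : Type} (xs : List α) (f : α → List β)
    (step : γ → β → γ) (acc : γ) :
    xs.foldl (fun a x => (f x).foldl step a) acc = (xs.flatMap f).foldl step acc := by
  induction xs generalizing acc with
  | nil => rfl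
  | cons x xs ih => simp [List.flatMap_cons, List.foldl_append, ih]

-- reset-and-append keeps the LAST hit
theorem pv_foldl_keep_last {α β : Type} (p : α → Bool) (g : α → β) (xs : List α) (acc : β) :
    xs.foldl (fun a x => if p x then g x else a) acc =
      (match xs.reverse.find? p with | some x => g x | none => acc) := by
  induction xs generalizing acc with
  | nil => rfl
  | cons x xs ih =>
      simp only [List.foldl_cons, ih, List.reverse_cons, List.find?_append]
      cases h : xs.reverse.find? p
      · cases hp : p x <;> simp [List.find?, hp]
      · simp

-- findSome? of a guard = find? then map
theorem pv_findSome?_guard {α β : Type} (p : α → Bool) (g : α → β) (l : List α) :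
    l.findSome? (fun x => if p x then some (g x) else none) = (l.find? p).map g := by
  induction l with
  | nil => rfl
  | cons x l ih =>
      by_cases h : p x <;> simp [List.find?, h, ih]

-- findSome? over a flatMap
theorem pv_findSome?_flatMap {α β γ : Type} (xs : List α) (f : α → List β) (h : β → Option γ) :
    (xs.flatMap f).findSome? h = xs.findSome? (fun x => (f x).findSome? h) := by
  induction xs with
  | nil => rfl
  | cons x xs ih =>
      simp only [List.flatMap_cons, List.findSome?_append, List.findSome?_cons]
      cases hx : (f x).findSome? h <;> simp [ih]

-- accumulator invariant for A's max-fold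
theorem pv_maxfold (value : Int) (V : List Int) (b : Bool) :
    V.foldl (fun m v => if v == value then (if v > m then v else m) else m)
        (if b && decide (value > 0) then value else 0) =
      (if (b || V.any (fun v => v == value)) && decide (value > 0) then value else 0) := by
  induction V generalizing b with
  | nil => simp
  | cons v V ih =>
      have hstep : (if v == value then
            (if v > (if b && decide (value > 0) then value else 0) then v
             else (if b && decide (value > 0) then value else 0))
          else (if b && decide (value > 0) then value else 0)) =
          (if (b || (v == value)) && decide (value > 0) then value else 0) := by
        by_cases hv : v = value <;> by_cases hp : value > 0 <;>
          cases b <;> simp_all <;> omega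
      rw [List.foldl_cons]
      show List.foldl _ (if v == value then
            (if v > (if b && decide (value > 0) then value else 0) then v
             else (if b && decide (value > 0) then value else 0))
          else (if b && decide (value > 0) then value else 0)) V = _
      rw [hstep, ih (b || (v == value))]
      simp [List.any_cons, Bool.or_assoc]

-- proof-side view of the scanned cells, in the ports' own vocabulary
def pvCells (array : List (List Int)) (current_task_index : Int) : List Int :=
  (PySem.List.pyRange 0 current_task_index 1).flatMap (fun i => PySem.List.pyGetD array i [])

theorem pv_aux_getD (A : List (List Int)) (n : Nat) :
    (List.range n).flatMap (fun k => A.getD k []) = (A.take n).flatten := by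
  induction n with
  | zero => simp
  | succ n ih =>
      rw [List.range_succ, List.flatMap_append, ih, List.take_add_one, List.flatten_append]
      cases h : A[n]? <;> simp [List.getD_eq_getElem?_getD, h]

theorem pv_cells_eq_scanned (array : List (List Int)) (cti : Int) :
    pvCells array cti = pvScanned array cti := by
  unfold pvCells pvScanned
  rw [PySem.List.pyRange_one, List.flatMap_map]
  simp only [Int.sub_zero, zero_add, PySem.List.pyGetD_natCast]
  exact pv_aux_getD array cti.toNat

-- A's first sweep: max_array = value if value occurs among the scanned cells and is positive, else 0
theorem pv_max_eq (array : List (List Int)) (cti : Int) (value : Int) :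
    pvMaxA array cti value =
      (if value ∈ pvCells array cti ∧ 0 < value then value else 0) := by
  unfold pvMaxA pvCells
  have h1 : ∀ (i : Int) (m : Int),
      (PySem.List.pyRange 0 (((PySem.List.pyGetD array i []).length : Int)) 1).foldl (fun m j =>
        if PySem.List.pyGetD (PySem.List.pyGetD array i []) j 0 == value then
          (if PySem.List.pyGetD (PySem.List.pyGetD array i []) j 0 > m then
            PySem.List.pyGetD (PySem.List.pyGetD array i []) j 0 else m)
        else m) m =
      (PySem.List.pyGetD array i []).foldl
        (fun m v => if v == value then (if v > m then v else m) else m) m := by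
    intro i m
    exact PySem.List.foldl_pyRange_zero_pyGetD' (PySem.List.pyGetD array i []) 0
      (fun m v => if v == value then (if v > m then v else m) else m) m
  rw [List.foldl_ext _ _ 0 (fun m i _ => h1 i m),
    pv_foldl_foldl_flatMap (PySem.List.pyRange 0 cti 1) (fun i => PySem.List.pyGetD array i []) _ 0]
  have h2 := pv_maxfold value
    ((PySem.List.pyRange 0 cti 1).flatMap (fun i => PySem.List.pyGetD array i [])) false
  simp only [Bool.false_and, if_neg Bool.false_ne_true, Bool.false_or] at h2
  rw [h2]
  have hcond : ((((PySem.List.pyRange 0 cti 1).flatMap (fun i => PySem.List.pyGetD array i [])).any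
        (fun v => v == value)) && decide (value > 0)) = true ↔
      (value ∈ (PySem.List.pyRange 0 cti 1).flatMap (fun i => PySem.List.pyGetD array i []) ∧ 0 < value) := by
    simp only [Bool.and_eq_true, List.any_eq_true, beq_iff_eq, decide_eq_true_eq, gt_iff_lt]
    constructor
    · rintro ⟨⟨v, hv, rfl⟩, hp⟩; exact ⟨hv, hp⟩
    · rintro ⟨hv, hp⟩; exact ⟨⟨value, hv, rfl⟩, hp⟩
  by_cases hc : value ∈ (PySem.List.pyRange 0 cti 1).flatMap (fun i => PySem.List.pyGetD array i []) ∧ 0 < value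
  · rw [if_pos (hcond.2 hc), if_pos hc]
  · rw [if_neg (fun h => hc (hcond.1 h)), if_neg hc]

-- per-row cell positions
def pvCellPos (array : List (List Int)) (i : Int) : List (Int × Int) :=
  (PySem.List.pyRange 0 (((PySem.List.pyGetD array i []).length : Int)) 1).map (fun j => (i, j))

-- the flattened positions, in A's scan order
def pvFlat (array : List (List Int)) (cti : Int) : List (Int × Int) :=
  (PySem.List.pyRange 0 cti 1).flatMap (pvCellPos array)

-- the hit test at position c against target t
def pvQ (array : List (List Int)) (t : Int) (c : Int × Int) : Bool :=
  PySem.List.pyGetD (PySem.List.pyGetD array c.1 []) c.2 0 == t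

-- the values at the flattened positions are exactly the scanned cells
theorem pv_flat_values (array : List (List Int)) (cti : Int) :
    (pvFlat array cti).map (fun c => PySem.List.pyGetD (PySem.List.pyGetD array c.1 []) c.2 0) =
      pvCells array cti := by
  unfold pvFlat pvCells
  rw [List.map_flatMap]
  refine List.flatMap_congr (fun i _ => ?_)
  unfold pvCellPos
  rw [List.map_map]
  exact PySem.List.map_pyGetD_pyRange_zero' (PySem.List.pyGetD array i []) 0

-- find? on the reversed flat list is none iff the target does not occur among the scanned cells
theorem pv_find_none (array : List (List Int)) (cti : Int) (t : Int) :
    (pvFlat array cti).reverse.find? (pvQ array t) = none ↔ t ∉ pvCells array cti := by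
  rw [List.find?_eq_none, ← pv_flat_values array cti]
  constructor
  · intro h hmem
    obtain ⟨c, hc, hv⟩ := List.mem_map.1 hmem
    have hq := h c (List.mem_reverse.2 hc)
    simp only [pvQ, beq_iff_eq] at hq
    exact hq hv
  · intro h c hc
    simp only [pvQ, beq_iff_eq]
    intro hv
    exact h (List.mem_map.2 ⟨c, List.mem_reverse.1 hc, hv⟩)

-- A reduced: last scanned position holding pvMaxA
theorem pv_A_eq (array : List (List Int)) (cti : Int) (value : Int) :
    find_index_2d array cti value =
      ((pvFlat array cti).reverse.find? (pvQ array (pvMaxA array cti value))).map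
        (fun c => [c]) := by
  have hfold : pvIndexesA array cti value =
      (match (pvFlat array cti).reverse.find? (pvQ array (pvMaxA array cti value)) with
        | some c => [c] | none => []) := by
    unfold pvIndexesA pvFlat
    set t := pvMaxA array cti value with ht
    have h2 : ∀ (i : Int) (idxs : List (Int × Int)),
      (PySem.List.pyRange 0 (((PySem.List.pyGetD array i []).length : Int)) 1).foldl (fun idxs j =>
        if PySem.List.pyGetD (PySem.List.pyGetD array i []) j 0 == t then [(i, j)] else idxs) idxs =
      (pvCellPos array i).foldl (fun idxs c => if pvQ array t c then [c] else idxs) idxs := by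
      intro i idxs
      unfold pvCellPos
      exact (@List.foldl_map Int (Int × Int) (List (Int × Int)) (fun j => (i, j))
        (fun idxs c => if pvQ array t c then [c] else idxs)
        (PySem.List.pyRange 0 (((PySem.List.pyGetD array i []).length : Int)) 1) idxs).symm
    rw [List.foldl_ext _ _ _ (fun idxs i _ => h2 i idxs),
      pv_foldl_foldl_flatMap (PySem.List.pyRange 0 cti 1) (pvCellPos array) _ [],
      pv_foldl_keep_last (pvQ array t) (fun c => [c]) _ []]
    cases List.find? (pvQ array t) ((List.flatMap (pvCellPos array) (PySem.List.pyRange 0 cti 1)).reverse) <;> rfl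
  unfold find_index_2d
  rw [hfold]
  cases (pvFlat array cti).reverse.find? (pvQ array (pvMaxA array cti value)) <;> rfl

-- B reduced: last scanned position holding value
theorem pv_B_eq (array : List (List Int)) (cti : Int) (value : Int) :
    find_index_2d_alt array cti value =
      ((pvFlat array cti).reverse.find? (pvQ array value)).map (fun c => [c]) := by
  unfold find_index_2d_alt
  have h3 : (fun i =>
      ((PySem.List.pyRange 0 (((PySem.List.pyGetD array i []).length : Int)) 1).reverse).findSome?
        (fun j => if PySem.List.pyGetD (PySem.List.pyGetD array i []) j 0 == value
          then some [(i, j)] else none)) =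
      (fun i => (((List.reverse ∘ pvCellPos array) i)).findSome?
        (fun c => if pvQ array value c then some [c] else none)) := by
    funext i
    unfold pvCellPos
    simp only [Function.comp, ← List.map_reverse, List.findSome?_map]
    rfl
  rw [h3,
    ← pv_findSome?_flatMap ((PySem.List.pyRange 0 cti 1).reverse) (List.reverse ∘ pvCellPos array) _,
    ← List.reverse_flatMap, pv_findSome?_guard]
  rfl

theorem find_index_2d_spec : Claim_unchanged_find_index_2d := by
  intro array cti value _ _
  unfold Spec_find_index_2d
  intro hnD
  unfold D_find_index_2d at hnD
  rw [← pv_cells_eq_scanned array cti] at hnD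
  rw [pv_A_eq, pv_B_eq, pv_max_eq]
  by_cases hmem : value ∈ pvCells array cti <;> by_cases hp : 0 < value
  · rw [if_pos ⟨hmem, hp⟩]
  · -- value ∈ cells, value ≤ 0: if value = 0 targets coincide; value < 0 contradicts ¬D_
    rcases lt_or_eq_of_le (le_of_not_gt hp) with hlt | heq
    · exact absurd (Or.inr ⟨hlt, Or.inl hmem⟩) hnD
    · rw [if_neg (by simp [hp]), heq]
  · -- value > 0 absent: ¬D_ gives 0 absent too; both searches miss
    have h0 : (0 : Int) ∉ pvCells array cti := fun h0 => hnD (Or.inl ⟨hp, hmem, h0⟩)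
    rw [if_neg (by tauto)]
    rw [(pv_find_none array cti 0).2 h0, (pv_find_none array cti value).2 hmem]
  · rcases lt_or_eq_of_le (le_of_not_gt hp) with hlt | heq
    · -- value < 0: ¬D_ gives both absent
      have h0 : (0 : Int) ∉ pvCells array cti := fun h0 => hnD (Or.inr ⟨hlt, Or.inr h0⟩)
      rw [if_neg (by tauto)]
      rw [(pv_find_none array cti 0).2 h0, (pv_find_none array cti value).2 hmem]
    · rw [if_neg (by tauto), heq]

theorem find_index_2d_changed : Claim_changed_find_index_2d := by
  unfold Claim_changed_find_index_2d; decide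

theorem find_index_2d_tight : Claim_exact_find_index_2d := by
  intro array cti value _ _ hD
  unfold D_find_index_2d at hD
  rw [← pv_cells_eq_scanned array cti] at hD
  rw [pv_A_eq, pv_B_eq, pv_max_eq]
  rcases hD with ⟨hp, habs, h0⟩ | ⟨hneg, hmem⟩
  · -- A finds a 0 cell, B finds nothing
    rw [if_neg (by tauto), (pv_find_none array cti value).2 habs]
    cases hf : (pvFlat array cti).reverse.find? (pvQ array 0) with
    | none => exact absurd ((pv_find_none array cti 0).1 hf) (by simpa using h0)
    | some c => simp
  · -- value < 0: the two found positions (if any) hold different values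
    rw [if_neg (by omega)]
    cases hf0 : (pvFlat array cti).reverse.find? (pvQ array 0) with
    | none =>
        have h0 : (0 : Int) ∉ pvCells array cti := (pv_find_none array cti 0).1 hf0
        cases hfv : (pvFlat array cti).reverse.find? (pvQ array value) with
        | none =>
            have hv : value ∉ pvCells array cti := (pv_find_none array cti value).1 hfv
            tauto
        | some c => simp
    | some c =>
        cases hfv : (pvFlat array cti).reverse.find? (pvQ array value) with
        | none => simp
        | some c' =>
            have hq0 : pvQ array 0 c = true := List.find?_some hf0
            have hqv : pvQ array value c' = true := List.find?_some hfv
            simp only [Option.map_some, ne_eq, Option.some_inj, List.cons.injEq, and_true]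
            intro hcc
            rw [hcc] at hq0
            simp only [pvQ, beq_iff_eq] at hq0 hqv
            omega
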